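-- pv_equiv track=rewrite | github.com/Squirozpa/BIO3339-2024 | Nucleotide_scripts/Fuzzy/FuzzyTypeSeq.py | fuzzy_str
-- ===== SOURCE A (Python) =====
-- def degen_iupac(nts_unique: list) -> str:
--     """Function to obtain the degenerate IUPAC nomenclature of the nts, according to the possible nts given
--
--     Args:
--         nts (list): List that contains only the possible possible nucleotides (in string format)
--
--     Returns:
--         str: A single letter of the corresponding degenerate IUPAC nomencalture
--     """
--     if len(nts_unique) == 1:
--         return nts_unique[0]
--     elif len(nts_unique) == 2:
--         if "A" in nts_unique:
--             if "T" in nts_unique: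
--                 return "W"
--             elif "G" in nts_unique:
--                 return "R"
--             elif "C" in nts_unique:
--                 return "M"
--         elif "T" in nts_unique:
--             if "G" in nts_unique:
--                 return "K"
--             elif "C" in nts_unique:
--                 return "Y"
--         elif "G" in nts_unique and "C" in nts_unique:
--             return "S"
--
--     elif len(nts_unique) == 3:
--         if "A" in nts_unique:
--             if "T" in nts_unique:
--                 if "G" in nts_unique:
--                     return "D"
--                 elif "C" in nts_unique:
--                     return "H"
--             elif "C" in nts_unique and "G" in nts_unique:
--                 return "V"
--         elif "G" in nts_unique and "C" in nts_unique and "T" in nts_unique: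
--             return "B"
--     else:
--         return "N"
--
-- def fuzzy_str(nts_list_ambigous, threshold) -> str:
--     """Converts the list the the string type for the fuzzy type sequence
--
--     Args:
--         nts_list_ambigous (_type_): List of ambigous nucleotides in following IUPAC convention
--
--     Returns:
--         str: A 2 line string for saving the Fuzzy type sequence
--     """
--     header = "PO\t" + \
--         "\t".join(map(str, range(1, len(nts_list_ambigous) + 1))) + "\n"
--     nts_line = f"NTS"
--     for pos in nts_list_ambigous:
--         nts = degen_iupac(pos)
--         nts_line += "\t" + nts
--     nts_line += "\n"+f"#threshold: {threshold}"
--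
--     return header + nts_line
-- ===== SOURCE B (Python) =====
-- _BIT = {"A": 1, "C": 2, "G": 4, "T": 8}
-- _CODE = "?ACMGRSVTWYHKDBN"
--
--
-- def _iupac(pos):
--     if len(pos) == 1:
--         return pos[0]
--     if len(pos) in (2, 3):
--         mask = 0
--         for base in pos:
--             mask |= _BIT[base]
--         return _CODE[mask]
--     return "N"
--
--
-- def fuzzy_str(nts_list_ambigous, threshold):
--     header = "PO\t" + "\t".join(map(str, range(1, len(nts_list_ambigous) + 1))) + "\n"
--     body = "\t".join(["NTS"] + [_iupac(pos) for pos in nts_list_ambigous])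
--     return header + body + "\n#threshold: " + str(threshold)
-- ===== Notes on version B (the rewrite author's own statement) =====
-- stated objective: alternative
-- what changed: Replaces degen_iupac's nested membership branch cascade with an arithmetic bit-encoding (A=1,C=2,G=4,T=8 OR-ed into a mask that indexes a 16-entry code string) and builds the NTS line by a single tab-join over a list comprehension instead of string accumulation in a loop.
-- outside the precondition, e.g. on fuzzy_str([['A', 'X']], 0): A raises TypeError, B raises KeyError
import Mathlib
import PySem

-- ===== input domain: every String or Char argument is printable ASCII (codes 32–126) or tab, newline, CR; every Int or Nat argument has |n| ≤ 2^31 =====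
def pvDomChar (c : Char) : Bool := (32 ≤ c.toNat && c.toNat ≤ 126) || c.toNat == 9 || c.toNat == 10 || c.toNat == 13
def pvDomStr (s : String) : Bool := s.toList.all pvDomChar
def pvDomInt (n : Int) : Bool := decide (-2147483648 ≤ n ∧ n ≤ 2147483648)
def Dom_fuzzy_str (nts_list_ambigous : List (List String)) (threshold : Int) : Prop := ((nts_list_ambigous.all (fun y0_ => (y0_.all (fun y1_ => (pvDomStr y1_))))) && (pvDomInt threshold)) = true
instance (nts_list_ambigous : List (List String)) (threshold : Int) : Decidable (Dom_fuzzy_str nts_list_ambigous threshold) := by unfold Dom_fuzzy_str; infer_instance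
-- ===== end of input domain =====

-- B replaces A's nested membership branch cascade with an arithmetic bit-encoding of the
-- bases (mask indexing a 16-entry code string) and builds the NTS line by a tab-join
-- over a comprehension instead of loop accumulation (alternative algorithm; same cost).


-- ===== PORT A =====
-- degen_iupac: the Python falls through (returns None) on len-2/3 positions that
-- match no branch; 'none' marks exactly those (Python then raises TypeError in fuzzy_str).
def degen_iupac (nts_unique : List String) : Option String :=
  if nts_unique.length = 1 then nts_unique[0]?
  else if nts_unique.length = 2 then
    if "A" ∈ nts_unique then
      if "T" ∈ nts_unique then some "W"
      else if "G" ∈ nts_unique then some "R"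
      else if "C" ∈ nts_unique then some "M"
      else none
    else if "T" ∈ nts_unique then
      if "G" ∈ nts_unique then some "K"
      else if "C" ∈ nts_unique then some "Y"
      else none
    else if "G" ∈ nts_unique ∧ "C" ∈ nts_unique then some "S"
    else none
  else if nts_unique.length = 3 then
    if "A" ∈ nts_unique then
      if "T" ∈ nts_unique then
        if "G" ∈ nts_unique then some "D"
        else if "C" ∈ nts_unique then some "H"
        else none
      else if "C" ∈ nts_unique ∧ "G" ∈ nts_unique then some "V"
      else none
    else if "G" ∈ nts_unique ∧ "C" ∈ nts_unique ∧ "T" ∈ nts_unique then some "B"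
    else none
  else some "N"

def fuzzy_str (nts_list_ambigous : List (List String)) (threshold : Int) : String :=
  let header := "PO\t" ++
    PySem.Str.join "\t" ((PySem.List.pyRange 1 ((nts_list_ambigous.length : Int) + 1) 1).map PySem.Int.toStr) ++ "\n"
  -- the loop; '(… ).getD ""' is only reached where degen_iupac = some _ (Pre_ excludes the TypeError inputs)
  let nts_line := nts_list_ambigous.foldl
    (fun acc pos => acc ++ "\t" ++ (degen_iupac pos).getD "") "NTS"
  let nts_line := nts_line ++ "\n" ++ ("#threshold: " ++ PySem.Int.toStr threshold)
  header ++ nts_line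

-- ===== PORT B =====
-- the _BIT dict of Source B
def iupacBit : PySem.Dict String Nat :=
  PySem.Dict.ofList [("A", 1), ("C", 2), ("G", 4), ("T", 8)]

-- _iupac of Source B; 'none' = the KeyError raised on a base outside _BIT (excluded by Pre_)
def iupac (pos : List String) : Option String :=
  if pos.length = 1 then pos[0]?
  else if pos.length = 2 ∨ pos.length = 3 then
    (pos.foldl (fun (m : Option Nat) b =>
        m.bind fun mv => (PySem.Dict.get? iupacBit b).map (fun v => mv ||| v))
        (some 0)).bind
      (fun mask => (PySem.Str.pyGet? "?ACMGRSVTWYHKDBN" (mask : Int)).map (fun c => String.ofList [c]))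
  else some "N"

def fuzzy_str_alt (nts_list_ambigous : List (List String)) (threshold : Int) : String :=
  let header := "PO\t" ++
    PySem.Str.join "\t" ((PySem.List.pyRange 1 ((nts_list_ambigous.length : Int) + 1) 1).map PySem.Int.toStr) ++ "\n"
  let body := PySem.Str.join "\t"
    ("NTS" :: nts_list_ambigous.map (fun pos => (iupac pos).getD ""))
  header ++ body ++ "\n" ++ ("#threshold: " ++ PySem.Int.toStr threshold)

-- ===== PRECONDITION & SPEC =====
-- Pre_ excludes exactly the inputs containing a length-2 or length-3 position with a repeated
-- base or a letter outside {A,T,G,C}: there A's degen_iupac falls through to None and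
-- fuzzy_str raises TypeError (B raises KeyError), so A returns no value.
def Pre_fuzzy_str (nts_list_ambigous : List (List String)) (threshold : Int) : Prop :=
  ∀ pos ∈ nts_list_ambigous, (pos.length = 2 ∨ pos.length = 3) →
    pos.Nodup ∧ ∀ x ∈ pos, x ∈ (["A", "T", "G", "C"] : List String)
instance (nts_list_ambigous : List (List String)) (threshold : Int) : Decidable (Pre_fuzzy_str nts_list_ambigous threshold) := by unfold Pre_fuzzy_str; infer_instance

def pvWitness_fuzzy_str : List (List String) × Int :=
  ([["A", "T"], ["G"], ["A", "C", "G"], [], ["A", "C", "G", "T"]], 5)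

def Spec_fuzzy_str (nts_list_ambigous : List (List String)) (threshold : Int) (out : String) : Prop := out = fuzzy_str_alt nts_list_ambigous threshold
instance (nts_list_ambigous : List (List String)) (threshold : Int) (out : String) : Decidable (Spec_fuzzy_str nts_list_ambigous threshold out) := by unfold Spec_fuzzy_str; infer_instance

-- ===== CLAIM (what is proved, stated in full; the proofs are below) =====
def Claim_equal_fuzzy_str : Prop := ∀ (nts_list_ambigous : List (List String)) (threshold : Int), Dom_fuzzy_str nts_list_ambigous threshold → Pre_fuzzy_str nts_list_ambigous threshold → Spec_fuzzy_str nts_list_ambigous threshold (fuzzy_str nts_list_ambigous threshold)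

-- ===== LEMMAS AND PROOFS =====

-- per-position agreement under the Pre_ side condition
theorem iupac_eq_degen (pos : List String)
    (h : (pos.length = 2 ∨ pos.length = 3) →
      pos.Nodup ∧ ∀ x ∈ pos, x ∈ (["A", "T", "G", "C"] : List String)) :
    degen_iupac pos = iupac pos := by
  match pos with
  | [] => rfl
  | [a] => rfl
  | [a, b] =>
    obtain ⟨hnd, hmem⟩ := h (Or.inl rfl)
    have ha := hmem a (by simp)
    have hb := hmem b (by simp)
    simp at ha hb hnd
    rcases ha with rfl | rfl | rfl | rfl <;> rcases hb with rfl | rfl | rfl | rfl <;>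
      first | (exact absurd rfl hnd) | decide
  | [a, b, c] =>
    obtain ⟨hnd, hmem⟩ := h (Or.inr rfl)
    have ha := hmem a (by simp)
    have hb := hmem b (by simp)
    have hc := hmem c (by simp)
    simp at ha hb hc hnd
    rcases ha with rfl | rfl | rfl | rfl <;> rcases hb with rfl | rfl | rfl | rfl <;>
      rcases hc with rfl | rfl | rfl | rfl <;>
      first
      | (exact absurd rfl hnd.1.1) | (exact absurd rfl hnd.1.2) | (exact absurd rfl hnd.2)
      | decide
  | a :: b :: c :: d :: rest =>
    have h1 : (a :: b :: c :: d :: rest).length = rest.length + 4 := by simp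
    simp only [degen_iupac, iupac, h1]
    have h2 : ¬ (rest.length + 4 = 1) := by omega
    have h3 : ¬ (rest.length + 4 = 2) := by omega
    have h4 : ¬ (rest.length + 4 = 3) := by omega
    simp [h2, h3, h4]

-- accumulation loop = join of the mapped pieces
theorem foldl_eq_join (f : List String → String) (l : List (List String)) :
    l.foldl (fun acc pos => acc ++ "\t" ++ f pos) "NTS"
      = "NTS" ++ String.join (l.map (fun pos => "\t" ++ f pos)) := by
  have hfun : (fun (acc : String) (pos : List String) => acc ++ "\t" ++ f pos)
      = (fun acc pos => acc ++ ("\t" ++ f pos)) := by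
    funext a p; rw [String.append_assoc]
  have shift : ∀ (l : List (List String)) (a b : String),
      l.foldl (fun acc pos => acc ++ ("\t" ++ f pos)) (a ++ b)
        = a ++ l.foldl (fun acc pos => acc ++ ("\t" ++ f pos)) b := by
    intro l
    induction l with
    | nil => intro a b; rfl
    | cons x xs ih =>
      intro a b
      show List.foldl _ (a ++ b ++ ("\t" ++ f x)) xs = _
      rw [String.append_assoc, ih]
      rfl
  have hjoin : String.join (l.map (fun pos => "\t" ++ f pos))
      = l.foldl (fun acc pos => acc ++ ("\t" ++ f pos)) "" := by
    simp [String.join, List.foldl_map]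
  rw [hfun, hjoin, show ("NTS" : String) = "NTS" ++ "" from rfl, shift l "NTS" ""]
  rfl

-- intercalate with a head element, peeled off
theorem inter_cons (s x : List Char) (l : List (List Char)) :
    s.intercalate (x :: l) = x ++ (l.map (fun y => s ++ y)).flatten := by
  induction l generalizing x with
  | nil => simp [List.intercalate]
  | cons z zs ih => simp [List.intercalate, List.intersperse] at ih ⊢; rw [ih z]

-- join with a head element = head ++ join of the tab-prefixed tail
theorem join_cons_head (ys : List String) :
    PySem.Str.join "\t" ("NTS" :: ys)
      = "NTS" ++ String.join (ys.map (fun y => "\t" ++ y)) := by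
  apply String.ext
  simp [PySem.Str.join, PySem.Chars.join, String.toList_join, String.toList_append,
        inter_cons, List.map_map]
  refine congrArg List.flatten (List.map_congr_left ?_)
  intro y _
  simp [Function.comp, String.toList_append]

-- ===== VERDICT (by name: the statement is the Claim_ definition above) =====
theorem fuzzy_str_spec : Claim_equal_fuzzy_str := by
  intro l t _ hpre
  unfold Spec_fuzzy_str fuzzy_str fuzzy_str_alt
  rw [foldl_eq_join (fun pos => (degen_iupac pos).getD "")]
  have hmap : l.map (fun pos => "\t" ++ (degen_iupac pos).getD "")
      = l.map (fun pos => "\t" ++ (iupac pos).getD "") := by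
    apply List.map_congr_left
    intro pos hm
    rw [iupac_eq_degen pos (hpre pos hm)]
  rw [hmap, show (fun pos => "\t" ++ (iupac pos).getD "") = (fun y => ("\t" ++ y)) ∘ (fun pos => (iupac pos).getD "") from rfl,
      ← List.map_map, join_cons_head]
  simp [String.append_assoc]
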